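-- pv_equiv track=rewrite | github.com/RishabhSingh-code/semester-4 | Geeks For Geeks/twentynineCode.py | min_swaps_to_bring_k_together
-- ===== SOURCE A (Python) =====
-- def min_swaps_to_bring_k_together(arr, k):
--     n = len(arr)
--
--     # Step 1: Count elements <= k
--     good = sum(1 for num in arr if num <= k)
--
--     # Step 2: Count bad elements in first window
--     bad = sum(1 for num in arr[:good] if num > k)
--
--     min_swaps = bad
--
--     # Step 3: Slide the window
--     for i in range(good, n):
--
--         # Remove left element from window
--         if arr[i - good] > k:
--             bad -= 1
--
--         # Add new right element to window
--         if arr[i] > k: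
--             bad += 1
--
--         min_swaps = min(min_swaps, bad)
--
--     return min_swaps
-- ===== SOURCE B (Python) =====
-- def min_swaps_to_bring_k_together(arr, k):
--     # Prefix sums of "element <= k", then scan every window start directly.
--     P = [0]
--     for x in arr:
--         P.append(P[-1] + (1 if x <= k else 0))
--     n = len(arr)
--     w = P[n]
--     return min(w - (P[s + w] - P[s]) for s in range(n - w + 1))
-- ===== Notes on version B (the rewrite author's own statement) =====
-- stated objective: alternative
-- what changed: B precomputes a prefix-sum array of counts of elements <= k and takes the minimum of w - (P[s+w]-P[s]) over all window starts directly, instead of A's incremental sliding bad-counter.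
import Mathlib
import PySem

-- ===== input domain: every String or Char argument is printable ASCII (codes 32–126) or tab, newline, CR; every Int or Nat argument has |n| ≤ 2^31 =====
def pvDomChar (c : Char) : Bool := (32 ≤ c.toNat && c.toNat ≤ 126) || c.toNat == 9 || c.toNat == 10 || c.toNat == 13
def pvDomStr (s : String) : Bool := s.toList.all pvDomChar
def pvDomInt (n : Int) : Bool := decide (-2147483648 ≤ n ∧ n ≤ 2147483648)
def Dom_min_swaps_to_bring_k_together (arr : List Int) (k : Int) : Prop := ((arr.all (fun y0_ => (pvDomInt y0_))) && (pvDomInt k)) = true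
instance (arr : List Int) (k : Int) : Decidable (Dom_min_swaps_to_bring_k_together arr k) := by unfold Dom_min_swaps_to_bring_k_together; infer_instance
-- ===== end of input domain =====

-- B replaces A's incremental sliding bad-counter with a prefix-sum table scanned per window start (alternative decomposition, same O(n) cost).

-- ===== PORT A =====
def min_swaps_to_bring_k_together (arr : List Int) (k : Int) : Int :=
  let n : Int := (arr.length : Int)
  let good : Int := ((arr.countP (fun num => decide (num ≤ k)) : Nat) : Int)
  let bad : Int := (((PySem.List.slice arr none (some good)).countP (fun num => decide (k < num)) : Nat) : Int)
  -- indices i - good and i always lie in range, so pyGetD's default is never used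
  let r := (PySem.List.pyRange good n 1).foldl (fun (st : Int × Int) i =>
    let bad1 := if k < PySem.List.pyGetD arr (i - good) 0 then st.1 - 1 else st.1
    let bad2 := if k < PySem.List.pyGetD arr i 0 then bad1 + 1 else bad1
    (bad2, min st.2 bad2)) (bad, bad)
  r.2

-- ===== PORT B =====
def min_swaps_to_bring_k_together_alt (arr : List Int) (k : Int) : Int :=
  let P : List Int := arr.foldl (fun P x => P ++ [PySem.List.pyGetD P (-1) 0 + (if x ≤ k then 1 else 0)]) [0]
  let n : Int := (arr.length : Int)
  let w : Int := PySem.List.pyGetD P n 0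
  let vals := (PySem.List.pyRange 0 (n - w + 1) 1).map
    (fun s => w - (PySem.List.pyGetD P (s + w) 0 - PySem.List.pyGetD P s 0))
  -- min over a nonempty generator (w ≤ n so range(n-w+1) is nonempty); the none branch is unreachable
  match PySem.List.min? vals (fun y => y) with
  | some m => m
  | none => 0

-- ===== PRECONDITION & SPEC =====
def Spec_min_swaps_to_bring_k_together (arr : List Int) (k : Int) (out : Int) : Prop := out = min_swaps_to_bring_k_together_alt arr k
instance (arr : List Int) (k : Int) (out : Int) : Decidable (Spec_min_swaps_to_bring_k_together arr k out) := by unfold Spec_min_swaps_to_bring_k_together; infer_instance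

-- ===== CLAIM (what is proved, stated in full; the proofs are below) =====
def Claim_equal_min_swaps_to_bring_k_together : Prop := ∀ (arr : List Int) (k : Int), Dom_min_swaps_to_bring_k_together arr k → Spec_min_swaps_to_bring_k_together arr k (min_swaps_to_bring_k_together arr k)

-- ===== LEMMAS AND PROOFS =====

-- number of elements > k in the window of length w = countP (≤ k) starting at s
def pvW (arr : List Int) (k : Int) (s : Nat) : Int :=
  ((((arr.drop s).take (arr.countP (fun x => decide (x ≤ k)))).countP (fun x => decide (k < x)) : Nat) : Int)

theorem pvP_char (arr : List Int) (k : Int) :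
    arr.foldl (fun P x => P ++ [PySem.List.pyGetD P (-1) 0 + (if x ≤ k then 1 else 0)]) [0]
      = (List.range (arr.length + 1)).map
          (fun j => (((arr.take j).countP (fun x => decide (x ≤ k)) : Nat) : Int)) := by
  induction arr using List.reverseRecOn with
  | nil => simp
  | append_singleton ys x ih =>
    rw [List.foldl_append, ih]
    simp only [List.foldl_cons, List.foldl_nil]
    rw [List.length_append, List.length_singleton]
    conv_rhs => rw [List.range_succ, List.map_append]
    congr 1
    · apply List.map_congr_left
      intro j hj
      rw [List.mem_range] at hj
      rw [List.take_append_of_le_length (by omega)]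
    · conv_lhs => rw [List.range_succ, List.map_append]
      simp only [List.map_cons, List.map_nil]
      rw [PySem.List.pyGetD_neg_one_append_singleton]
      congr 1
      rw [List.take_length, List.take_of_length_le (by simp), List.countP_append]
      simp only [List.countP_cons, List.countP_nil]
      push_cast
      split_ifs with h1 h2 h2 <;> simp_all <;> omega

theorem pv_slide (arr : List Int) (k : Int) (s : Nat)
    (h : s + arr.countP (fun x => decide (x ≤ k)) < arr.length) :
    pvW arr k (s+1) + (if k < arr.getD s 0 then 1 else 0)
      = pvW arr k s + (if k < arr.getD (s + arr.countP (fun x => decide (x ≤ k))) 0 then 1 else 0) := by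
  set w := arr.countP (fun x => decide (x ≤ k)) with hw
  have hs : s < arr.length := by omega
  have hsw : s + w < arr.length := h
  have e1 : (arr.drop s).take (w+1) = (arr.drop s).take w ++ [arr[s+w]] := by
    rw [List.take_add_one]
    congr 1
    rw [List.getElem?_drop, List.getElem?_eq_getElem hsw]
    rfl
  have e2 : (arr.drop s).take (w+1) = arr[s] :: (arr.drop (s+1)).take w := by
    rw [List.drop_eq_getElem_cons hs, List.take_succ_cons]
  have c1 := congrArg (List.countP (fun x => decide (k < x))) e1
  rw [e2] at c1
  simp only [List.countP_append, List.countP_cons, List.countP_nil] at c1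
  have g1 : arr.getD s 0 = arr[s] := List.getD_eq_getElem arr 0 hs
  have g2 : arr.getD (s + w) 0 = arr[s+w] := List.getD_eq_getElem arr 0 hsw
  unfold pvW
  rw [← hw, g1, g2]
  split_ifs with h1 h2 h2 <;> simp [h1, h2] at c1 ⊢ <;> omega

theorem pv_val (arr : List Int) (k : Int) (j : Nat)
    (h : j + arr.countP (fun x => decide (x ≤ k)) ≤ arr.length) :
    ((arr.countP (fun x => decide (x ≤ k)) : Nat) : Int)
      - (((arr.take (j + arr.countP (fun x => decide (x ≤ k)))).countP (fun x => decide (x ≤ k)) : Nat)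
         - ((arr.take j).countP (fun x => decide (x ≤ k)) : Nat))
      = pvW arr k j := by
  set w := arr.countP (fun x => decide (x ≤ k)) with hw
  have e : arr.take (j + w) = arr.take j ++ (arr.drop j).take w := by
    rw [← List.take_add]
  rw [e, List.countP_append]
  have hlen : ((arr.drop j).take w).length = w := by
    rw [List.length_take, List.length_drop]; omega
  have hsplit : ((arr.drop j).take w).countP (fun x => decide (x ≤ k))
      + ((arr.drop j).take w).countP (fun x => decide (k < x)) = w := by
    have := List.length_eq_countP_add_countP (l := (arr.drop j).take w) (fun x => decide (x ≤ k))
    rw [hlen] at this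
    have hc : ((arr.drop j).take w).countP (fun a => decide ¬(decide (a ≤ k) = true))
        = ((arr.drop j).take w).countP (fun x => decide (k < x)) := by
      apply List.countP_congr
      intro x _
      simp [not_le]
    rw [hc] at this
    omega
  unfold pvW
  rw [← hw]
  push_cast
  omega

theorem pv_loopA (arr : List Int) (k : Int) (t : Nat) :
    ∀ (s : Nat) (m : Int),
    s + t + arr.countP (fun x => decide (x ≤ k)) = arr.length →
    (PySem.List.pyRange (((arr.countP (fun x => decide (x ≤ k)) + s : Nat) : Int)) ((arr.length : Int)) 1).foldl
      (fun (st : Int × Int) i =>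
        let bad1 := if k < PySem.List.pyGetD arr (i - ((arr.countP (fun num => decide (num ≤ k)) : Nat) : Int)) 0 then st.1 - 1 else st.1
        let bad2 := if k < PySem.List.pyGetD arr i 0 then bad1 + 1 else bad1
        (bad2, min st.2 bad2))
      (pvW arr k s, m)
    = (pvW arr k (arr.length - arr.countP (fun x => decide (x ≤ k))),
       ((List.range t).map (fun j => pvW arr k (s + (j + 1)))).foldl min m) := by
  set w := arr.countP (fun x => decide (x ≤ k)) with hw
  induction t with
  | zero =>
    intro s m h
    rw [PySem.List.pyRange_one_eq_nil (by push_cast; omega)]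
    simp only [List.foldl_nil, List.range_zero, List.map_nil]
    have : s = arr.length - w := by omega
    rw [this]
  | succ t ih =>
    intro s m h
    rw [PySem.List.pyRange_one_cons (by push_cast; omega)]
    rw [List.foldl_cons]
    have hsw : s + w < arr.length := by omega
    have hs : s < arr.length := by omega
    -- evaluate the two indexings
    have g1 : PySem.List.pyGetD arr (((w + s : Nat) : Int) - ((w : Nat) : Int)) 0 = arr.getD s 0 := by
      have : ((w + s : Nat) : Int) - ((w : Nat) : Int) = ((s : Nat) : Int) := by push_cast; ring
      rw [this, PySem.List.pyGetD_natCast]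
    have g2 : PySem.List.pyGetD arr ((w + s : Nat) : Int) 0 = arr.getD (s + w) 0 := by
      rw [PySem.List.pyGetD_natCast]
      congr 1
      omega
    simp only [g1, g2]
    have hstep : (if k < arr.getD (s + w) 0 then
          (if k < arr.getD s 0 then pvW arr k s - 1 else pvW arr k s) + 1
        else (if k < arr.getD s 0 then pvW arr k s - 1 else pvW arr k s)) = pvW arr k (s+1) := by
      have := pv_slide arr k s (by rw [← hw]; omega)
      rw [← hw] at this
      split_ifs at this ⊢ <;> omega
    rw [hstep]
    have harg : ((w + s : Nat) : Int) + 1 = ((w + (s+1) : Nat) : Int) := by push_cast; ring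
    rw [harg]
    rw [ih (s+1) (min m (pvW arr k (s+1))) (by omega)]
    congr 1
    rw [List.range_succ_eq_map]
    simp only [List.map_cons, List.foldl_cons, List.map_map]
    have e2 : s + (0 + 1) = s + 1 := by omega
    rw [e2]
    have e1 : (List.range t).map ((fun j => pvW arr k (s + (j+1))) ∘ Nat.succ)
        = (List.range t).map (fun j => pvW arr k (s + 1 + (j+1))) := by
      apply List.map_congr_left
      intro j _
      simp only [Function.comp_apply]
      congr 1
      omega
    rw [e1]

-- ===== VERDICT (by name: the statement is the Claim_ definition above) =====
theorem pvP_get (arr : List Int) (k : Int) (j : Nat) (hj : j ≤ arr.length) :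
    PySem.List.pyGetD
        ((List.range (arr.length + 1)).map
          (fun j => (((arr.take j).countP (fun x => decide (x ≤ k)) : Nat) : Int))) ((j : Nat) : Int) 0
      = (((arr.take j).countP (fun x => decide (x ≤ k)) : Nat) : Int) := by
  rw [PySem.List.pyGetD_natCast]
  rw [List.getD_eq_getElem?_getD, List.getElem?_map, List.getElem?_range (by omega)]
  rfl

theorem min_swaps_to_bring_k_together_spec : Claim_equal_min_swaps_to_bring_k_together := by
  unfold Claim_equal_min_swaps_to_bring_k_together
  intro arr k _
  unfold Spec_min_swaps_to_bring_k_together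
  simp only [min_swaps_to_bring_k_together, min_swaps_to_bring_k_together_alt]
  have hwn : arr.countP (fun x => decide (x ≤ k)) ≤ arr.length := List.countP_le_length
  -- A side
  rw [PySem.List.slice_to_natCast]
  have hb0 : (((arr.take (arr.countP (fun num => decide (num ≤ k)))).countP (fun num => decide (k < num)) : Nat) : Int)
      = pvW arr k 0 := by
    unfold pvW
    rw [List.drop_zero]
  rw [hb0]
  have L := pv_loopA arr k (arr.length - arr.countP (fun x => decide (x ≤ k))) 0 (pvW arr k 0) (by omega)
  rw [show ((arr.countP (fun x => decide (x ≤ k)) + 0 : Nat) : Int)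
        = ((arr.countP (fun x => decide (x ≤ k)) : Nat) : Int) from by norm_num] at L
  rw [L]
  -- B side
  rw [pvP_char arr k]
  rw [pvP_get arr k arr.length le_rfl, List.take_length]
  rw [show ((arr.length : Int) - ((arr.countP (fun x => decide (x ≤ k)) : Nat) : Int) + 1)
        = (((arr.length - arr.countP (fun x => decide (x ≤ k)) + 1 : Nat)) : Int) from by omega]
  rw [PySem.List.pyRange_zero_natCast, List.map_map]
  have hv : (List.range (arr.length - arr.countP (fun x => decide (x ≤ k)) + 1)).map
        ((fun s => ((arr.countP (fun x => decide (x ≤ k)) : Nat) : Int) -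
            (PySem.List.pyGetD
              ((List.range (arr.length + 1)).map
                (fun j => (((arr.take j).countP (fun x => decide (x ≤ k)) : Nat) : Int)))
              (s + ((arr.countP (fun x => decide (x ≤ k)) : Nat) : Int)) 0 -
             PySem.List.pyGetD
              ((List.range (arr.length + 1)).map
                (fun j => (((arr.take j).countP (fun x => decide (x ≤ k)) : Nat) : Int)))
              s 0)) ∘ (fun n : Nat => (n : Int)))
      = (List.range (arr.length - arr.countP (fun x => decide (x ≤ k)) + 1)).map (fun j => pvW arr k j) := by
    apply List.map_congr_left
    intro j hj
    rw [List.mem_range] at hj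
    simp only [Function.comp_apply]
    rw [show ((j : Nat) : Int) + ((arr.countP (fun x => decide (x ≤ k)) : Nat) : Int)
          = (((j + arr.countP (fun x => decide (x ≤ k)) : Nat)) : Int) from by push_cast; ring]
    rw [pvP_get arr k (j + arr.countP (fun x => decide (x ≤ k))) (by omega)]
    rw [pvP_get arr k j (by omega)]
    exact pv_val arr k j (by omega)
  rw [hv]
  rw [List.range_succ_eq_map]
  simp only [List.map_cons, List.map_map, PySem.List.min?_id_cons]
  have ht : (List.range (arr.length - arr.countP (fun x => decide (x ≤ k)))).map
        ((fun j => pvW arr k j) ∘ Nat.succ)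
      = (List.range (arr.length - arr.countP (fun x => decide (x ≤ k)))).map
        (fun j => pvW arr k (0 + (j + 1))) := by
    apply List.map_congr_left
    intro j _
    simp only [Function.comp_apply]
    congr 1
    omega
  rw [ht]
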